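-- pv_equiv track=rewrite | github.com/lego0901/PTTyR-UROP | src/crawler/lib_crawler.py | subclass_of_module
-- ===== SOURCE A (Python) =====
-- def subclass_of_module(edges, inheritance_keywords):
--     vst = set([])
--     def dfs(a):
--         vst.add(a)
--         if a in edges.keys():
--             for b in edges[a]:
--                 if b not in vst:
--                     dfs(b)
--     for m in inheritance_keywords:
--         dfs(m)
--     return vst
-- ===== SOURCE B (Python) =====
-- def subclass_of_module(edges, inheritance_keywords):
--     visited = set()
--     stack = list(reversed(inheritance_keywords))
--     while stack:
--         node = stack.pop()
--         if node in visited: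
--             continue
--         visited.add(node)
--         if node in edges:
--             stack.extend(reversed(edges[node]))
--     return visited
-- ===== Notes on version B (the rewrite author's own statement) =====
-- stated objective: alternative
-- what changed: Replaces the recursive closure-based DFS with an iterative worklist: an explicit stack seeded with the keywords, popping nodes, skipping visited ones and pushing neighbors, so no recursion (and no RecursionError on deep chains).
import Mathlib
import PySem

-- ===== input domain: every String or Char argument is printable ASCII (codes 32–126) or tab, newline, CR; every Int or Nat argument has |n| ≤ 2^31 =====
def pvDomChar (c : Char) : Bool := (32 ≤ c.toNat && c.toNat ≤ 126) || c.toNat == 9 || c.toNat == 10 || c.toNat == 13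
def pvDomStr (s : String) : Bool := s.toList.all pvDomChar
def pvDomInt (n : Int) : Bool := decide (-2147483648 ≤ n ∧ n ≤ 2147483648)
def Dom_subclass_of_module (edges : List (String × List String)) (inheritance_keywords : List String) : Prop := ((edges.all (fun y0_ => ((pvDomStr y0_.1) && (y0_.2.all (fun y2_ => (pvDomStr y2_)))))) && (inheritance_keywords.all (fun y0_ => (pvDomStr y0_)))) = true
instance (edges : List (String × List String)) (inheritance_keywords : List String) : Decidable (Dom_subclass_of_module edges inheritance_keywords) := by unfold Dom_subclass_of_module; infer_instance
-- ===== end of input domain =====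

-- B replaces A's recursive closure-based DFS by an iterative explicit-stack worklist (same reachable set, no recursion).

-- ===== PORT A =====
-- pvUnivA/fuel: a finite superset of every node the DFS can ever visit; the fuel bound only
-- makes the recursion total in Lean and is never exhausted on an actual run.
def pvUnivA (edges : List (String × List String)) (inheritance_keywords : List String) : List String :=
  inheritance_keywords ++ edges.flatMap (fun p => p.1 :: p.2)

mutual
-- dfs(a): vst.add(a); if a in edges: for b in edges[a]: if b not in vst: dfs(b)
def pvDfsA (edges : List (String × List String)) : Nat → String → PySem.Set String → PySem.Set String
  | 0, a, v => PySem.Set.add v a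
  | Nat.succ n, a, v =>
    match (PySem.Dict.mk edges).get? a with
    | none => PySem.Set.add v a
    | some bs => pvGoA edges n bs (PySem.Set.add v a)
  termination_by n _ _ => (n, 0, 0)
-- the 'for b in edges[a]' loop
def pvGoA (edges : List (String × List String)) : Nat → List String → PySem.Set String → PySem.Set String
  | _, [], v => v
  | n, b :: bs, v => if b ∈ v then pvGoA edges n bs v else pvGoA edges n bs (pvDfsA edges n b v)
  termination_by n bs _ => (n, 1, bs.length)
end

def subclass_of_module (edges : List (String × List String)) (inheritance_keywords : List String) : List String :=
  inheritance_keywords.foldl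
    (fun v m => pvDfsA edges ((pvUnivA edges inheritance_keywords).length + 1) m v)
    PySem.Set.empty

-- ===== PORT B =====
-- fuel bound for the worklist loop: total pops ≤ initial stack + (distinct nodes) * (max push size);
-- it only makes the loop total in Lean and is never exhausted on an actual run.
def pvMaxLenB (edges : List (String × List String)) : Nat :=
  edges.foldl (fun m p => max m p.2.length) 0

-- while stack: node = stack.pop(); if visited: continue; visit; push reversed(edges[node])
-- (Lean list head = Python stack top, so extend(reversed(bs)) is 'bs ++ stack')
def pvLoopB (edges : List (String × List String)) : Nat → List String → PySem.Set String → PySem.Set String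
  | 0, _, v => v
  | Nat.succ _, [], v => v
  | Nat.succ n, b :: s, v =>
    if b ∈ v then pvLoopB edges n s v
    else
      match (PySem.Dict.mk edges).get? b with
      | none => pvLoopB edges n s (PySem.Set.add v b)
      | some bs => pvLoopB edges n (bs ++ s) (PySem.Set.add v b)

def subclass_of_module_alt (edges : List (String × List String)) (inheritance_keywords : List String) : List String :=
  pvLoopB edges
    (inheritance_keywords.length +
      (PySem.List.dedup (pvUnivA edges inheritance_keywords)).length * (pvMaxLenB edges + 1))
    inheritance_keywords PySem.Set.empty

-- ===== PRECONDITION & SPEC =====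
def Spec_subclass_of_module (edges : List (String × List String)) (inheritance_keywords : List String) (out : List String) : Prop := out = subclass_of_module_alt edges inheritance_keywords
instance (edges : List (String × List String)) (inheritance_keywords : List String) (out : List String) : Decidable (Spec_subclass_of_module edges inheritance_keywords out) := by unfold Spec_subclass_of_module; infer_instance

-- ===== CLAIM (what is proved, stated in full; the proofs are below) =====
def Claim_equal_subclass_of_module : Prop := ∀ (edges : List (String × List String)) (inheritance_keywords : List String), Dom_subclass_of_module edges inheritance_keywords → Spec_subclass_of_module edges inheritance_keywords (subclass_of_module edges inheritance_keywords)

-- ===== LEMMAS AND PROOFS =====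

-- neighbours of a node, as the dict lookup's value (empty when absent)
def pvNb (edges : List (String × List String)) (a : String) : List String :=
  ((PySem.Dict.mk edges).get? a).getD []

-- remaining budget: how many universe nodes are not yet visited
def pvK (U v : List String) : Nat :=
  (PySem.List.dedup U).countP (fun x => decide (x ∉ v))

-- v is closed under edges, up to the exception list E
def pvClosed (edges : List (String × List String)) (v E : List String) : Prop :=
  ∀ x ∈ v, ∀ b ∈ pvNb edges x, b ∈ v ∨ b ∈ E

-- the foldl-max in pvMaxLenB bounds every entry
lemma pvFoldMax (edges : List (String × List String)) (init : Nat) :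
    init ≤ edges.foldl (fun m p => max m p.2.length) init ∧
    (∀ p ∈ edges, p.2.length ≤ edges.foldl (fun m p => max m p.2.length) init) := by
  induction edges generalizing init with
  | nil => simp
  | cons q rest ih =>
    constructor
    · exact le_trans (le_max_left _ _) (ih (max init q.2.length)).1
    · intro p hp
      rcases List.mem_cons.mp hp with h | h
      · subst h; exact le_trans (le_max_right _ _) (ih _).1
      · exact (ih _).2 p h

lemma pvNb_mem (edges : List (String × List String)) (a : String) (bs : List String)
    (h : (PySem.Dict.mk edges).get? a = some bs) : ∃ p ∈ edges, p.2 = bs := by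
  induction edges with
  | nil => simp [PySem.Dict.get?] at h
  | cons p rest ih =>
    rw [show (p :: rest) = ((p.1, p.2) :: rest) by simp] at h
    rw [PySem.Dict.get?_mk_cons] at h
    by_cases he : p.1 == a
    · simp [he] at h; exact ⟨p, List.mem_cons_self, h⟩
    · simp [he] at h; obtain ⟨q, hq, hq2⟩ := ih h; exact ⟨q, List.mem_cons_of_mem _ hq, hq2⟩

lemma pvNb_sub (edges : List (String × List String)) (kw : List String) (a : String) (bs : List String)
    (h : (PySem.Dict.mk edges).get? a = some bs) : ∀ b ∈ bs, b ∈ pvUnivA edges kw := by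
  intro b hb
  obtain ⟨p, hp, hp2⟩ := pvNb_mem edges a bs h
  refine List.mem_append_right _ ?_
  exact List.mem_flatMap.mpr ⟨p, hp, by rw [hp2]; exact List.mem_cons_of_mem _ hb⟩

lemma pvNb_len (edges : List (String × List String)) (a : String) (bs : List String)
    (h : (PySem.Dict.mk edges).get? a = some bs) : bs.length ≤ pvMaxLenB edges := by
  obtain ⟨p, hp, hp2⟩ := pvNb_mem edges a bs h
  rw [← hp2]
  exact (pvFoldMax edges 0).2 p hp

lemma pvK_le (U v : List String) : pvK U v ≤ (PySem.List.dedup U).length :=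
  List.countP_le_length

lemma pvK_mono (U v v' : List String) (h : ∀ x, x ∈ v → x ∈ v') : pvK U v' ≤ pvK U v := by
  apply List.countP_mono_left
  intro x _ hx
  simp at hx ⊢
  exact fun hv => hx (h x hv)

lemma pvK_add_lt (U v : List String) (b : String) (hb : b ∈ U) (hnv : b ∉ v) :
    pvK U (PySem.Set.add v b) < pvK U v := by
  unfold pvK
  have hbd : b ∈ PySem.List.dedup U := by rw [PySem.List.mem_dedup]; exact hb
  obtain ⟨s, t, hst⟩ := List.append_of_mem hbd
  rw [hst, List.countP_append, List.countP_append, List.countP_cons, List.countP_cons]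
  have h1 : List.countP (fun x => decide (x ∉ PySem.Set.add v b)) s ≤ List.countP (fun x => decide (x ∉ v)) s := by
    apply List.countP_mono_left; intro x _ hx; simp [PySem.Set.mem_add] at hx ⊢; exact hx.1
  have h2 : List.countP (fun x => decide (x ∉ PySem.Set.add v b)) t ≤ List.countP (fun x => decide (x ∉ v)) t := by
    apply List.countP_mono_left; intro x _ hx; simp [PySem.Set.mem_add] at hx ⊢; exact hx.1
  have e1 : (decide (b ∉ PySem.Set.add v b)) = false := by simp [PySem.Set.mem_add]
  have e2 : (decide (b ∉ v)) = true := by simp [hnv]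
  rw [e1, e2]
  simp only [Bool.false_eq_true, if_false, if_true]
  omega

-- the visited set only grows
lemma pvMonoA (edges : List (String × List String)) (n : Nat) :
    (∀ a v x, x ∈ v → x ∈ pvDfsA edges n a v) ∧
    (∀ bs v x, x ∈ v → x ∈ pvGoA edges n bs v) := by
  induction n with
  | zero =>
    have hgo : ∀ bs v x, x ∈ v → x ∈ pvGoA edges 0 bs v := by
      intro bs
      induction bs with
      | nil => intro v x hx; simpa [pvGoA] using hx
      | cons b bs ih =>
        intro v x hx
        rw [pvGoA]
        split
        · exact ih v x hx
        · exact ih _ x (by rw [pvDfsA]; exact (PySem.Set.mem_add _ _ _).mpr (Or.inl hx))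
    exact ⟨fun a v x hx => by rw [pvDfsA]; exact (PySem.Set.mem_add _ _ _).mpr (Or.inl hx), hgo⟩
  | succ n ih =>
    have hdfs : ∀ a v x, x ∈ v → x ∈ pvDfsA edges (n+1) a v := by
      intro a v x hx
      rw [pvDfsA]
      have hx1 : x ∈ PySem.Set.add v a := (PySem.Set.mem_add _ _ _).mpr (Or.inl hx)
      split
      · exact hx1
      · exact ih.2 _ _ x hx1
    have hgo : ∀ bs v x, x ∈ v → x ∈ pvGoA edges (n+1) bs v := by
      intro bs
      induction bs with
      | nil => intro v x hx; simpa [pvGoA] using hx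
      | cons b bs ihb =>
        intro v x hx
        rw [pvGoA]
        split
        · exact ihb v x hx
        · exact ihb _ x (hdfs b v x hx)
    exact ⟨hdfs, hgo⟩

lemma pvGoA_nil (edges : List (String × List String)) (m : Nat) (v : PySem.Set String) :
    pvGoA edges m [] v = v := by
  cases m <;> simp [pvGoA]

-- fuel irrelevance: any two sufficient fuels give the same result
lemma pvStab (edges : List (String × List String)) (kw : List String) (n : Nat) :
    (∀ m a v, a ∈ pvUnivA edges kw →
      pvK (pvUnivA edges kw) (PySem.Set.add v a) < n →
      pvK (pvUnivA edges kw) (PySem.Set.add v a) < m →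
      pvDfsA edges n a v = pvDfsA edges m a v) ∧
    (∀ m bs v, (∀ b ∈ bs, b ∈ pvUnivA edges kw) →
      pvK (pvUnivA edges kw) v ≤ n → pvK (pvUnivA edges kw) v ≤ m →
      pvGoA edges n bs v = pvGoA edges m bs v) := by
  induction n with
  | zero =>
    refine ⟨fun m a v _ h1 _ => by omega, ?_⟩
    intro m bs
    induction bs with
    | nil => intro v _ _ _; rw [pvGoA_nil, pvGoA_nil]
    | cons b bs ihb =>
      intro v hsub h1 h2
      rw [pvGoA, pvGoA]
      by_cases hb : b ∈ v
      · simp only [hb, if_true]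
        exact ihb v (fun x hx => hsub x (List.mem_cons_of_mem _ hx)) h1 h2
      · exfalso
        have := pvK_add_lt (pvUnivA edges kw) v b (hsub b List.mem_cons_self) hb
        omega
  | succ n ihn =>
    have hdfs : ∀ m a v, a ∈ pvUnivA edges kw →
        pvK (pvUnivA edges kw) (PySem.Set.add v a) < n + 1 →
        pvK (pvUnivA edges kw) (PySem.Set.add v a) < m →
        pvDfsA edges (n+1) a v = pvDfsA edges m a v := by
      intro m a v ha h1 h2
      obtain ⟨m', rfl⟩ := Nat.exists_eq_succ_of_ne_zero (by omega : m ≠ 0)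
      rw [pvDfsA, pvDfsA]
      cases hnb : (PySem.Dict.mk edges).get? a with
      | none => rfl
      | some bs =>
        exact ihn.2 m' bs (PySem.Set.add v a) (pvNb_sub edges kw a bs hnb)
          (by omega) (by omega)
    refine ⟨hdfs, ?_⟩
    intro m bs
    induction bs with
    | nil => intro v _ _ _; rw [pvGoA_nil, pvGoA_nil]
    | cons b bs ihb =>
      intro v hsub h1 h2
      rw [pvGoA, pvGoA]
      by_cases hb : b ∈ v
      · simp only [hb, if_true]
        exact ihb v (fun x hx => hsub x (List.mem_cons_of_mem _ hx)) h1 h2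
      · simp only [hb, if_false]
        have hbU : b ∈ pvUnivA edges kw := hsub b List.mem_cons_self
        have hlt := pvK_add_lt (pvUnivA edges kw) v b hbU hb
        have hd : pvDfsA edges (n+1) b v = pvDfsA edges m b v :=
          hdfs m b v hbU (by omega) (by omega)
        rw [← hd]
        have hmono : ∀ x, x ∈ v → x ∈ pvDfsA edges (n+1) b v :=
          fun x hx => (pvMonoA edges (n+1)).1 b v x hx
        exact ihb (pvDfsA edges (n+1) b v)
          (fun x hx => hsub x (List.mem_cons_of_mem _ hx))
          (le_trans (pvK_mono _ _ _ hmono) h1)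
          (le_trans (pvK_mono _ _ _ hmono) h2)

-- a finished call has visited its argument(s) and left a closed set (up to E)
lemma pvClos (edges : List (String × List String)) (kw : List String) (n : Nat) :
    (∀ a v E, a ∈ pvUnivA edges kw →
      pvK (pvUnivA edges kw) (PySem.Set.add v a) < n → pvClosed edges v E →
      (∀ x, (x ∈ v ∨ x = a) → x ∈ pvDfsA edges n a v) ∧ pvClosed edges (pvDfsA edges n a v) E) ∧
    (∀ bs v E, (∀ b ∈ bs, b ∈ pvUnivA edges kw) →
      pvK (pvUnivA edges kw) v ≤ n →
      (∀ x ∈ v, ∀ b ∈ pvNb edges x, b ∈ v ∨ b ∈ bs ∨ b ∈ E) →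
      (∀ x, (x ∈ v ∨ x ∈ bs) → x ∈ pvGoA edges n bs v) ∧ pvClosed edges (pvGoA edges n bs v) E) := by
  induction n with
  | zero =>
    refine ⟨fun a v E _ h1 _ => by omega, ?_⟩
    intro bs
    induction bs with
    | nil =>
      intro v E _ _ hcl
      rw [pvGoA_nil]
      refine ⟨fun x hx => by rcases hx with hx | hx; exact hx; simp at hx, ?_⟩
      intro x hx b hb
      rcases hcl x hx b hb with h | h | h
      · exact Or.inl h
      · simp at h
      · exact Or.inr h
    | cons b bs ihb =>
      intro v E hsub h1 hcl
      rw [pvGoA]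
      by_cases hb : b ∈ v
      · simp only [hb, if_true]
        obtain ⟨hm, hc⟩ := ihb v E (fun x hx => hsub x (List.mem_cons_of_mem _ hx)) h1
          (by
            intro x hx c hc'
            rcases hcl x hx c hc' with h | h | h
            · exact Or.inl h
            · rcases List.mem_cons.mp h with h' | h'
              · exact Or.inl (h' ▸ hb)
              · exact Or.inr (Or.inl h')
            · exact Or.inr (Or.inr h))
        refine ⟨?_, hc⟩
        intro x hx
        rcases hx with hx | hx
        · exact hm x (Or.inl hx)
        · rcases List.mem_cons.mp hx with h' | h'
          · exact hm x (Or.inl (h' ▸ hb))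
          · exact hm x (Or.inr h')
      · exfalso
        have := pvK_add_lt (pvUnivA edges kw) v b (hsub b List.mem_cons_self) hb
        omega
  | succ n ihn =>
    have hdfs : ∀ a v E, a ∈ pvUnivA edges kw →
        pvK (pvUnivA edges kw) (PySem.Set.add v a) < n + 1 → pvClosed edges v E →
        (∀ x, (x ∈ v ∨ x = a) → x ∈ pvDfsA edges (n+1) a v) ∧
          pvClosed edges (pvDfsA edges (n+1) a v) E := by
      intro a v E ha h1 hcl
      rw [pvDfsA]
      cases hnb : (PySem.Dict.mk edges).get? a with
      | none =>
        refine ⟨fun x hx => by rcases hx with hx | hx <;> simp [PySem.Set.mem_add, hx], ?_⟩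
        intro x hx b hb
        rcases (PySem.Set.mem_add _ _ _).mp hx with h | h
        · rcases hcl x h b hb with h' | h'
          · exact Or.inl ((PySem.Set.mem_add _ _ _).mpr (Or.inl h'))
          · exact Or.inr h'
        · subst h
          unfold pvNb at hb
          rw [hnb] at hb
          simp at hb
      | some bs =>
        obtain ⟨hm, hc⟩ := ihn.2 bs (PySem.Set.add v a) E (pvNb_sub edges kw a bs hnb)
          (by omega)
          (by
            intro x hx c hc'
            rcases (PySem.Set.mem_add _ _ _).mp hx with h | h
            · rcases hcl x h c hc' with h' | h'
              · exact Or.inl ((PySem.Set.mem_add _ _ _).mpr (Or.inl h'))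
              · exact Or.inr (Or.inr h')
            · subst h
              unfold pvNb at hc'
              rw [hnb] at hc'
              simp at hc'
              exact Or.inr (Or.inl hc'))
        refine ⟨?_, hc⟩
        intro x hx
        refine hm x (Or.inl ((PySem.Set.mem_add _ _ _).mpr ?_))
        rcases hx with hx | hx
        · exact Or.inl hx
        · exact Or.inr hx
    refine ⟨hdfs, ?_⟩
    intro bs
    induction bs with
    | nil =>
      intro v E _ _ hcl
      rw [pvGoA_nil]
      refine ⟨fun x hx => by rcases hx with hx | hx; exact hx; simp at hx, ?_⟩
      intro x hx b hb
      rcases hcl x hx b hb with h | h | h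
      · exact Or.inl h
      · simp at h
      · exact Or.inr h
    | cons b bs ihb =>
      intro v E hsub h1 hcl
      rw [pvGoA]
      by_cases hb : b ∈ v
      · simp only [hb, if_true]
        obtain ⟨hm, hc⟩ := ihb v E (fun x hx => hsub x (List.mem_cons_of_mem _ hx)) h1
          (by
            intro x hx c hc'
            rcases hcl x hx c hc' with h | h | h
            · exact Or.inl h
            · rcases List.mem_cons.mp h with h' | h'
              · exact Or.inl (h' ▸ hb)
              · exact Or.inr (Or.inl h')
            · exact Or.inr (Or.inr h))
        refine ⟨?_, hc⟩
        intro x hx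
        rcases hx with hx | hx
        · exact hm x (Or.inl hx)
        · rcases List.mem_cons.mp hx with h' | h'
          · exact hm x (Or.inl (h' ▸ hb))
          · exact hm x (Or.inr h')
      · simp only [hb, if_false]
        have hbU : b ∈ pvUnivA edges kw := hsub b List.mem_cons_self
        have hlt := pvK_add_lt (pvUnivA edges kw) v b hbU hb
        obtain ⟨hm1, hc1⟩ := hdfs b v ((b :: bs) ++ E) hbU (by omega)
          (by
            intro x hx c hc'
            rcases hcl x hx c hc' with h | h | h
            · exact Or.inl h
            · exact Or.inr (List.mem_append_left _ h)
            · exact Or.inr (List.mem_append_right _ h))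
        have hmono : ∀ x, x ∈ v → x ∈ pvDfsA edges (n+1) b v := fun x hx => hm1 x (Or.inl hx)
        obtain ⟨hm2, hc2⟩ := ihb (pvDfsA edges (n+1) b v) E
          (fun x hx => hsub x (List.mem_cons_of_mem _ hx))
          (le_trans (pvK_mono _ _ _ hmono) h1)
          (by
            intro x hx c hc'
            rcases hc1 x hx c hc' with h | h
            · exact Or.inl h
            · rcases List.mem_append.mp h with h' | h'
              · rcases List.mem_cons.mp h' with h'' | h''
                · exact Or.inl (h'' ▸ hm1 b (Or.inr rfl))
                · exact Or.inr (Or.inl h'')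
              · exact Or.inr (Or.inr h'))
        refine ⟨?_, hc2⟩
        intro x hx
        rcases hx with hx | hx
        · exact hm2 x (Or.inl (hmono x hx))
        · rcases List.mem_cons.mp hx with h' | h'
          · exact hm2 x (Or.inl (h' ▸ hm1 b (Or.inr rfl)))
          · exact hm2 x (Or.inr h')

lemma pvGoA_skip (edges : List (String × List String)) (n : Nat) (bs : List String)
    (v : PySem.Set String) (h : ∀ b ∈ bs, b ∈ v) : pvGoA edges n bs v = v := by
  revert h
  induction bs with
  | nil => intro _; exact pvGoA_nil _ _ _
  | cons b bs ih =>
    intro h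
    rw [pvGoA]
    simp only [h b List.mem_cons_self, if_true]
    exact ih (fun c hc => h c (List.mem_cons_of_mem _ hc))

lemma pvDfsA_noop (edges : List (String × List String)) (n : Nat) (a : String)
    (v : PySem.Set String) (ha : a ∈ v) (hc : pvClosed edges v []) : pvDfsA edges n a v = v := by
  cases n with
  | zero => rw [pvDfsA]; exact PySem.Set.add_of_mem ha
  | succ n =>
    rw [pvDfsA]
    cases hnb : (PySem.Dict.mk edges).get? a with
    | none => exact PySem.Set.add_of_mem ha
    | some bs =>
      rw [PySem.Set.add_of_mem ha]
      apply pvGoA_skip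
      intro b hb
      have hb' : b ∈ pvNb edges a := by unfold pvNb; rw [hnb]; exact hb
      rcases hc a ha b hb' with h | h
      · exact h
      · simp at h

lemma pvGoA_append (edges : List (String × List String)) (n : Nat) (l1 l2 : List String)
    (v : PySem.Set String) : pvGoA edges n (l1 ++ l2) v = pvGoA edges n l2 (pvGoA edges n l1 v) := by
  induction l1 generalizing v with
  | nil => rw [List.nil_append, pvGoA_nil]
  | cons b l1 ih =>
    rw [List.cons_append, pvGoA, pvGoA]
    by_cases hb : b ∈ v
    · simp only [hb, if_true]; exact ih v
    · simp only [hb, if_false]; exact ih _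

lemma pvDedupLen (U : List String) : (PySem.List.dedup U).length ≤ U.length := by
  rw [PySem.List.dedup_eq_ofList]
  exact PySem.Set.length_ofList_le _

-- unfolding one DFS call at the standard fuel
lemma pvDfs_top (edges : List (String × List String)) (kw : List String) (b : String)
    (v : PySem.Set String) (hbU : b ∈ pvUnivA edges kw) (hbv : b ∉ v) :
    pvDfsA edges (pvUnivA edges kw).length b v =
      pvGoA edges (pvUnivA edges kw).length (pvNb edges b) (PySem.Set.add v b) := by
  have hlt := pvK_add_lt (pvUnivA edges kw) v b hbU hbv
  have hkv := pvK_le (pvUnivA edges kw) v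
  have hdl := pvDedupLen (pvUnivA edges kw)
  obtain ⟨u, hu⟩ := Nat.exists_eq_succ_of_ne_zero
    (by have := List.length_pos_of_mem hbU; omega : (pvUnivA edges kw).length ≠ 0)
  rw [hu, pvDfsA]
  cases hnb : (PySem.Dict.mk edges).get? b with
  | none =>
    unfold pvNb
    rw [hnb]
    rw [show (none : Option (List String)).getD [] = [] from rfl, pvGoA_nil]
  | some bs =>
    unfold pvNb
    rw [hnb]
    rw [show (some bs).getD [] = bs from rfl]
    exact (pvStab edges kw u).2 (u+1) bs (PySem.Set.add v b) (pvNb_sub edges kw b bs hnb)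
      (by omega) (by omega)

-- the worklist loop simulates the neighbour-fold of the recursive DFS
lemma pvCross (edges : List (String × List String)) (kw : List String) :
    ∀ m s v, (∀ x ∈ s, x ∈ pvUnivA edges kw) →
      s.length + pvK (pvUnivA edges kw) v * (pvMaxLenB edges + 1) ≤ m →
      pvLoopB edges m s v = pvGoA edges (pvUnivA edges kw).length s v := by
  intro m
  induction m with
  | zero =>
    intro s v _ hb
    have hs : s = [] := List.eq_nil_of_length_eq_zero (by omega)
    subst hs
    rw [pvGoA_nil]
    rfl
  | succ m ihm =>
    intro s v hsub hb
    cases s with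
    | nil => rw [pvGoA_nil]; rfl
    | cons b s' =>
      rw [pvLoopB, pvGoA]
      by_cases hbv : b ∈ v
      · simp only [hbv, if_true]
        refine ihm s' v (fun x hx => hsub x (List.mem_cons_of_mem _ hx)) ?_
        simp only [List.length_cons] at hb
        omega
      · simp only [hbv, if_false]
        have hbU := hsub b List.mem_cons_self
        have hlt := pvK_add_lt (pvUnivA edges kw) v b hbU hbv
        have hmul : pvK (pvUnivA edges kw) (PySem.Set.add v b) * (pvMaxLenB edges + 1) +
            (pvMaxLenB edges + 1) ≤ pvK (pvUnivA edges kw) v * (pvMaxLenB edges + 1) := by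
          have h1 : pvK (pvUnivA edges kw) (PySem.Set.add v b) + 1 ≤ pvK (pvUnivA edges kw) v := hlt
          calc pvK (pvUnivA edges kw) (PySem.Set.add v b) * (pvMaxLenB edges + 1) + (pvMaxLenB edges + 1)
              = (pvK (pvUnivA edges kw) (PySem.Set.add v b) + 1) * (pvMaxLenB edges + 1) := by ring
            _ ≤ pvK (pvUnivA edges kw) v * (pvMaxLenB edges + 1) :=
                Nat.mul_le_mul_right _ h1
        rw [pvDfs_top edges kw b v hbU hbv, ← pvGoA_append]
        simp only [List.length_cons] at hb
        cases hnb : (PySem.Dict.mk edges).get? b with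
        | none =>
          have hnbe : pvNb edges b = [] := by unfold pvNb; rw [hnb]; rfl
          rw [hnbe, List.nil_append]
          refine ihm s' (PySem.Set.add v b) (fun x hx => hsub x (List.mem_cons_of_mem _ hx)) ?_
          omega
        | some bs =>
          have hnbe : pvNb edges b = bs := by unfold pvNb; rw [hnb]; rfl
          have hlen := pvNb_len edges b bs hnb
          rw [hnbe]
          refine ihm (bs ++ s') (PySem.Set.add v b) ?_ ?_
          · intro x hx
            rcases List.mem_append.mp hx with h | h
            · exact pvNb_sub edges kw b bs hnb x h
            · exact hsub x (List.mem_cons_of_mem _ h)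
          · rw [List.length_append]
            omega

-- the top-level keyword loop of A is the same neighbour-fold
lemma pvTop (edges : List (String × List String)) (kw : List String) :
    ∀ kwl v, (∀ x ∈ kwl, x ∈ pvUnivA edges kw) → pvClosed edges v [] →
      kwl.foldl (fun v m => pvDfsA edges ((pvUnivA edges kw).length + 1) m v) v =
        pvGoA edges (pvUnivA edges kw).length kwl v := by
  intro kwl
  induction kwl with
  | nil =>
    intro v _ _
    rw [pvGoA_nil]
    rfl
  | cons a kwl ih =>
    intro v hsub hcl
    simp only [List.foldl_cons]
    rw [pvGoA]
    by_cases hav : a ∈ v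
    · simp only [hav, if_true]
      rw [pvDfsA_noop edges _ a v hav hcl]
      exact ih v (fun x hx => hsub x (List.mem_cons_of_mem _ hx)) hcl
    · simp only [hav, if_false]
      have haU := hsub a List.mem_cons_self
      have hlt := pvK_add_lt (pvUnivA edges kw) v a haU hav
      have hkv := pvK_le (pvUnivA edges kw) v
      have hdl := pvDedupLen (pvUnivA edges kw)
      have hstab : pvDfsA edges ((pvUnivA edges kw).length + 1) a v =
          pvDfsA edges (pvUnivA edges kw).length a v :=
        (pvStab edges kw ((pvUnivA edges kw).length + 1)).1 (pvUnivA edges kw).length a v haU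
          (by omega) (by omega)
      rw [hstab]
      have hcl' : pvClosed edges (pvDfsA edges (pvUnivA edges kw).length a v) [] :=
        ((pvClos edges kw (pvUnivA edges kw).length).1 a v [] haU (by omega) hcl).2
      exact ih (pvDfsA edges (pvUnivA edges kw).length a v)
        (fun x hx => hsub x (List.mem_cons_of_mem _ hx)) hcl'

-- ===== VERDICT (by name: the statement is the Claim_ definition above) =====
theorem subclass_of_module_spec : Claim_equal_subclass_of_module := by
  intro edges kw _
  unfold Spec_subclass_of_module subclass_of_module subclass_of_module_alt
  rw [pvTop edges kw kw PySem.Set.empty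
        (by intro x hx; exact List.mem_append_left _ hx)
        (by intro x hx; simp [PySem.Set.empty] at hx),
      pvCross edges kw _ kw PySem.Set.empty
        (by intro x hx; exact List.mem_append_left _ hx)
        (by
          have h1 := pvK_le (pvUnivA edges kw) PySem.Set.empty
          have h2 := Nat.mul_le_mul_right (pvMaxLenB edges + 1) h1
          omega)]
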